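-- pv_equiv track=rewrite | github.com/Jellybean940-afk/FortniteBot | Fortnite/Variants.py | GetVariantNames
-- ===== SOURCE A (Python) =====
-- def GetVariantNames(All):
--     i = 0
--     VariantNames = []
--     args = All.split(" ")
--     lenOfArgs = len(args) - 1
--     for arg in args:
--         i += 1
--         if "=" in arg:
--             indexOfVariant = All.index(arg)
--             indexOfEqual = arg.index("=")
--             VariantNames.append(All[indexOfVariant:(indexOfVariant + indexOfEqual + 1)])
--     return VariantNames
-- ===== SOURCE B (Python) =====
-- def GetVariantNames(All):
--     return [tok[:tok.index("=") + 1] for tok in All.split(" ") if "=" in tok]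
-- ===== Notes on version B (the rewrite author's own statement) =====
-- stated objective: simpler
-- what changed: B drops A's redundant All.index(arg) substring search and its unused loop counter entirely: each token containing an equals sign is sliced directly to just past its first equals sign in a single comprehension over the split, never looking back into the original string.
import Mathlib
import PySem

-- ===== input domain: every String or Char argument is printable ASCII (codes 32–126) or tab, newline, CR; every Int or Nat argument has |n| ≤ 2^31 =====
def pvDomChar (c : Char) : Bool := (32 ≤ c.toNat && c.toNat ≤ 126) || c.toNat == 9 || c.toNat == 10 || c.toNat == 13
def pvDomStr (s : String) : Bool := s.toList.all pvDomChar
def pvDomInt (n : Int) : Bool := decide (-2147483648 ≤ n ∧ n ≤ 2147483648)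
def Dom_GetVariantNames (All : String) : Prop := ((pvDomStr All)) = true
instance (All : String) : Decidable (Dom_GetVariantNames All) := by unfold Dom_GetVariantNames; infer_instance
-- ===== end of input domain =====

-- B drops A's redundant All.index lookup and slices each token directly (one pass, simpler); return value proved identical.

-- ===== PORT A =====
-- Python's str.index raises ValueError only when the needle is absent; both uses below
-- are guarded (arg is a piece of All.split(" "), hence a substring of All, and '=' in arg
-- was just checked), so PySem.Str.find (= .index wherever it succeeds) is exact here.
def GetVariantNames (All : String) : List String :=
  let args := (PySem.Str.split? All " ").getD []
  let _lenOfArgs : Int := (args.length : Int) - 1   -- computed and unused, as in A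
  (args.foldl
    (fun (st : Int × List String) arg =>
      let i := st.1 + 1
      if PySem.Str.isIn "=" arg then
        let indexOfVariant := PySem.Str.find All arg
        let indexOfEqual := PySem.Str.find arg "="
        (i, st.2 ++ [PySem.Str.slice All (some indexOfVariant)
                       (some (indexOfVariant + indexOfEqual + 1))])
      else
        (i, st.2))
    ((0 : Int), ([] : List String))).2

-- ===== PORT B =====
def GetVariantNames_alt (All : String) : List String :=
  ((PySem.Str.split? All " ").getD []).filterMap (fun tok =>
    if PySem.Str.isIn "=" tok then
      some (PySem.Str.slice tok none (some (PySem.Str.find tok "=" + 1)))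
    else none)

-- ===== PRECONDITION & SPEC =====
def Spec_GetVariantNames (All : String) (out : List String) : Prop := out = GetVariantNames_alt All
instance (All : String) (out : List String) : Decidable (Spec_GetVariantNames All out) := by unfold Spec_GetVariantNames; infer_instance

-- ===== CLAIM (what is proved, stated in full; the proofs are below) =====
def Claim_equal_GetVariantNames : Prop := ∀ (All : String), Dom_GetVariantNames All → Spec_GetVariantNames All (GetVariantNames All)

-- ===== LEMMAS AND PROOFS =====

-- A's loop threads an index counter that never affects the output; its second component
-- is the filterMap of the token list.
lemma pv_foldl_snd_filterMap (p : String → Bool) (f : String → String) :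
    ∀ (args : List String) (i : Int) (acc : List String),
    (args.foldl (fun (st : Int × List String) arg =>
        if p arg then (st.1 + 1, st.2 ++ [f arg]) else (st.1 + 1, st.2)) (i, acc)).2
      = acc ++ args.filterMap (fun arg => if p arg then some (f arg) else none) := by
  intro args
  induction args with
  | nil => intro i acc; simp
  | cons a t ih =>
    intro i acc
    by_cases h : p a = true
    · simp [List.foldl, h, ih]
    · simp [List.foldl, h, ih]

-- every piece produced by the split loop is an infix of (cur.reverse ++ remaining input)
lemma pv_mem_splitOn_go_infix (sep : List Char) :
    ∀ (fuel : Nat) (l cur : List Char) (acc : List (List Char)) (piece : List Char),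
    piece ∈ PySem.Chars.splitOn.go sep fuel l cur acc →
      piece ∈ acc ∨ piece <:+: (cur.reverse ++ l) := by
  intro fuel
  induction fuel with
  | zero =>
    intro l cur acc piece h
    simp [PySem.Chars.splitOn.go] at h
    rcases h with h | h
    · exact Or.inl h
    · exact Or.inr (h ▸ List.infix_refl _)
  | succ fuel ih =>
    intro l cur acc piece h
    cases l with
    | nil =>
      simp [PySem.Chars.splitOn.go] at h
      rcases h with h | h
      · exact Or.inl h
      · exact Or.inr (by rw [h]; simp)
    | cons c rest =>
      rw [PySem.Chars.splitOn.go] at h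
      by_cases hp : sep.isPrefixOf (c :: rest) = true
      · rw [if_pos hp] at h
        rcases ih _ _ _ _ h with hmem | hinf
        · rcases List.mem_cons.1 hmem with h1 | h1
          · exact Or.inr (h1 ▸ (List.prefix_append cur.reverse (c :: rest)).isInfix)
          · exact Or.inl h1
        · refine Or.inr (hinf.trans ?_)
          simpa using ((List.drop_suffix sep.length (c :: rest)).isInfix.trans
            (List.suffix_append cur.reverse (c :: rest)).isInfix)
      · rw [if_neg hp] at h
        rcases ih _ _ _ _ h with hmem | hinf
        · exact Or.inl hmem
        · refine Or.inr ?_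
          simpa [List.append_assoc] using hinf

lemma pv_mem_splitOn_infix {s sep tok : List Char}
    (h : tok ∈ PySem.Chars.splitOn s sep) : tok <:+: s := by
  unfold PySem.Chars.splitOn at h
  rcases pv_mem_splitOn_go_infix sep _ _ _ _ _ h with hmem | hinf
  · simp at hmem
  · simpa using hinf

-- the substring A cuts out of All is exactly the head of the token up to its first '='
lemma pv_slice_eq (All tok : String) (hinf : tok.toList <:+: All.toList)
    (heq : PySem.Str.isIn "=" tok = true) :
    PySem.Str.slice All (some (PySem.Str.find All tok))
        (some (PySem.Str.find All tok + PySem.Str.find tok "=" + 1))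
      = PySem.Str.slice tok none (some (PySem.Str.find tok "=" + 1)) := by
  have hiv : 0 ≤ PySem.Chars.find All.toList tok.toList :=
    (PySem.Chars.find_nonneg_iff _ _).2 hinf
  have hinf2 : ("=".toList) <:+: tok.toList := (PySem.Str.isIn_iff_infix _ _).1 heq
  have hie : 0 ≤ PySem.Chars.find tok.toList "=".toList :=
    (PySem.Chars.find_nonneg_iff _ _).2 hinf2
  obtain ⟨nv, hnv⟩ : ∃ n : Nat, PySem.Chars.find All.toList tok.toList = (n : Int) :=
    ⟨_, (Int.toNat_of_nonneg hiv).symm⟩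
  obtain ⟨ne, hne⟩ : ∃ n : Nat, PySem.Chars.find tok.toList "=".toList = (n : Int) :=
    ⟨_, (Int.toNat_of_nonneg hie).symm⟩
  have hpre : tok.toList <+: All.toList.drop nv := by
    have h := (PySem.Chars.find_spec hiv).1
    rwa [hnv, Int.toNat_natCast] at h
  have hpre2 : "=".toList <+: tok.toList.drop ne := by
    have h := (PySem.Chars.find_spec hie).1
    rwa [hne, Int.toNat_natCast] at h
  have hlt : ne < tok.toList.length := by
    have h := hpre2.length_le
    simp only [List.length_drop] at h
    have h1 : ("=".toList).length = 1 := by decide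
    omega
  have hfa : PySem.Str.find All tok = (nv : Int) := hnv
  have hft : PySem.Str.find tok "=" = (ne : Int) := hne
  unfold PySem.Str.slice
  congr 1
  rw [hfa, hft, PySem.Chars.slice_eq_listSlice, PySem.Chars.slice_eq_listSlice]
  rw [show ((nv : Int) + (ne : Int) + 1) = ((nv + ne + 1 : Nat) : Int) from by push_cast; ring]
  rw [show ((ne : Int) + 1) = ((ne + 1 : Nat) : Int) from by push_cast; ring]
  have hR := PySem.List.slice_to tok.toList
    (show (0 : Int) ≤ ((ne + 1 : Nat) : Int) from by omega)
  rw [PySem.List.slice_natCast, hR, Int.toNat_natCast,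
    show nv + ne + 1 - nv = ne + 1 from by omega]
  obtain ⟨t, ht⟩ := hpre
  rw [← ht, List.take_append_of_le_length (by omega)]

-- every token of A's split is an infix of All
lemma pv_mem_args_infix (All tok : String)
    (h : tok ∈ (PySem.Str.split? All " ").getD []) : tok.toList <:+: All.toList := by
  have hmap := PySem.Str.split?_map All " "
  cases hsp : PySem.Str.split? All " " with
  | none =>
    rw [hsp] at hmap
    simp [PySem.Chars.split?] at hmap
  | some L =>
    rw [hsp] at hmap
    simp [PySem.Chars.split?] at hmap
    rw [hsp] at h
    simp at h
    exact pv_mem_splitOn_infix (hmap ▸ List.mem_map_of_mem h)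

-- ===== VERDICT (by name: the statement is the Claim_ definition above) =====
theorem GetVariantNames_spec : Claim_equal_GetVariantNames := by
  intro All _
  unfold Spec_GetVariantNames GetVariantNames GetVariantNames_alt
  rw [pv_foldl_snd_filterMap (fun arg => PySem.Str.isIn "=" arg)
        (fun arg => PySem.Str.slice All (some (PySem.Str.find All arg))
          (some (PySem.Str.find All arg + PySem.Str.find arg "=" + 1)))]
  rw [List.nil_append]
  apply List.filterMap_congr
  intro tok hmem
  by_cases h : PySem.Str.isIn "=" tok = true
  · simp only [h, if_true, Option.some.injEq]
    exact pv_slice_eq All tok (pv_mem_args_infix All tok hmem) h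
  · rw [if_neg h, if_neg h]
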